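-- pv_equiv track=rewrite | github.com/zyanham/MyTools | DEV_TOOLS/CXP_WS/trgintr_gen.py | process_input_lines
-- ===== SOURCE A (Python) =====
-- def process_input_lines(input_lines, random_numbers):
--     output_lines = []
--     inserted_count = 0
--     prev_line = ""
--
--     if random_numbers :
--         first_num = random_numbers[0]
--         random_numbers.pop(0)
--
--     for line_index, line in enumerate(input_lines):
-- #        output_lines.append(line)
--
--         if inserted_count == first_num :
--             if line.strip() == "IT":
--                 output_lines.append(line)
--                 output_lines.extend("SOP-TRG\n")
--                 output_lines.extend("HDP-TRG\n")
--                 output_lines.extend("EOP-TRG\n")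
--             elif line.strip() == "SOP":
--                 output_lines.append(line)
--                 output_lines.extend("HDP\n")
--                 output_lines.extend("EOP-TRG\n")
--                 output_lines.extend("SOP-TRG\n")
--                 output_lines.extend("HDP-TRG\n")
--                 output_lines.extend("HDP\n")
--             elif line.strip() == "HDP":
--                 output_lines.append(line)
--                 output_lines.extend("EOP-TRG\n")
--                 output_lines.extend("SOP-TRG\n")
--                 output_lines.extend("HDP-TRG\n")
--                 output_lines.extend("HDP\n")
--             elif line.strip() == "EOP":
--                 output_lines.append(line)
--                 output_lines.extend("SOP-TRG\n")
--                 output_lines.extend("HDP-TRG\n")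
--                 output_lines.extend("EOP-TRG\n")
--             elif line.strip() == "SOP-INT":
--                 output_lines.append(line)
--                 output_lines.extend("HDP\n")
--                 output_lines.extend("EOP-TRG\n")
--                 output_lines.extend("SOP-TRG\n")
--                 output_lines.extend("HDP-TRG\n")
--                 output_lines.extend("HDP\n")
--             elif line.strip() == "EOP-INT":
--                 output_lines.append(line)
--                 output_lines.extend("SOP-TRG\n")
--                 output_lines.extend("HDP-TRG\n")
--                 output_lines.extend("EOP-TRG\n")
--             elif line.strip() == "SOP-IOACK":
--                 if prev_line == "EOP-IOACK":
--                     output_lines.extend("SOP-TRG\n")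
--                     output_lines.extend("HDP-TRG\n")
--                     output_lines.extend("EOP-TRG\n")
--                     output_lines.append(line)
--                 else :
--                     output_lines.extend("SOP-TRG\n")
--                     output_lines.extend("HDP-TRG\n")
--                     output_lines.extend("EOP-TRG\n")
--                     output_lines.append(line)
--             elif line.strip() == "HDP-IOACK":
--                     output_lines.append(line)
--             elif line.strip() == "EOP-IOACK":
--                 if prev_line == "HDF-IOACK":
--                     output_lines.append(line)
--                     output_lines.extend("SOP-TRG\n")
--                     output_lines.extend("HDP-TRG\n")
--                     output_lines.extend("EOP-TRG\n")
--                 else: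
--                     output_lines.append(line)
--                     output_lines.extend("IT\n")
--                     output_lines.extend("IT\n")
--                     output_lines.extend("IT\n")
--                     output_lines.extend("SOP-TRG\n")
--                     output_lines.extend("HDP-TRG\n")
--                     output_lines.extend("EOP-TRG\n")
--
--             if random_numbers :
--                 first_num = random_numbers[0]
--                 random_numbers.pop(0)
--             else :
--                 first_num = 100000000;
--         else:
--             output_lines.append(line)
--
--         inserted_count += 1
--         prev_line = line.strip()
--
--     return output_lines
-- ===== SOURCE B (Python) =====
-- # Staged rewrite: first compute the set of indices that actually trigger (a closed
-- # form of A's counter/pop(0)/sentinel protocol), then a second pass over the lines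
-- # emits each line or its marker block (markers as one concatenated string splayed
-- # by list(), as A's char-wise .extend does).
-- # Note: A consumes random_numbers with pop(0); B does not mutate its arguments
-- # (the equivalence is about the return value only).
--
-- _SENTINEL = 100000000  # A's "no more numbers" sentinel
--
--
-- def _block(line, prev):
--     """Output produced for a line standing at a trigger index."""
--     key = line.strip()
--     TRG = "SOP-TRG\nHDP-TRG\nEOP-TRG\n"
--     FULL = "HDP\nEOP-TRG\nSOP-TRG\nHDP-TRG\nHDP\n"
--     if key == "SOP-IOACK":
--         return list(TRG) + [line]
--     if key in ("IT", "EOP", "EOP-INT"):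
--         tail = TRG
--     elif key in ("SOP", "SOP-INT"):
--         tail = FULL
--     elif key == "HDP":
--         tail = "EOP-TRG\nSOP-TRG\nHDP-TRG\nHDP\n"
--     elif key == "HDP-IOACK":
--         tail = ""
--     elif key == "EOP-IOACK":
--         tail = TRG if prev == "HDF-IOACK" else "IT\nIT\nIT\n" + TRG
--     else:
--         return []  # a non-marker line at a trigger index is dropped, as in A
--     return [line] + list(tail)
--
--
-- def process_input_lines(input_lines, random_numbers):
--     n = len(input_lines)
--     # stage 1: the indices that fire are the maximal chain of strictly increasing,
--     # in-range numbers read from the front (A's sentinel fires too if reached)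
--     triggers = set()
--     last = -1
--     for r in list(random_numbers) + [_SENTINEL]:
--         if last < r < n:
--             triggers.add(r)
--             last = r
--         else:
--             break
--     # stage 2: emit
--     out = []
--     prev = ""
--     for i, line in enumerate(input_lines):
--         if i in triggers:
--             out += _block(line, prev)
--         else:
--             out.append(line)
--         prev = line.strip()
--     return out
-- ===== Notes on version B (the rewrite author's own statement) =====
-- stated objective: alternative
-- what changed: B replaces A's online counter/pop(0)/sentinel protocol by a staged algorithm: a first pass over random_numbers computes in closed form the set of indices that actually fire (the maximal strictly-increasing in-range chain read from the front, plus A's sentinel), then a second pass over the lines emits each line or its marker block, with the markers held as one concatenated string splayed by list() instead of nine sequential char-wise extends; B does not mutate random_numbers.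
import Mathlib
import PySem

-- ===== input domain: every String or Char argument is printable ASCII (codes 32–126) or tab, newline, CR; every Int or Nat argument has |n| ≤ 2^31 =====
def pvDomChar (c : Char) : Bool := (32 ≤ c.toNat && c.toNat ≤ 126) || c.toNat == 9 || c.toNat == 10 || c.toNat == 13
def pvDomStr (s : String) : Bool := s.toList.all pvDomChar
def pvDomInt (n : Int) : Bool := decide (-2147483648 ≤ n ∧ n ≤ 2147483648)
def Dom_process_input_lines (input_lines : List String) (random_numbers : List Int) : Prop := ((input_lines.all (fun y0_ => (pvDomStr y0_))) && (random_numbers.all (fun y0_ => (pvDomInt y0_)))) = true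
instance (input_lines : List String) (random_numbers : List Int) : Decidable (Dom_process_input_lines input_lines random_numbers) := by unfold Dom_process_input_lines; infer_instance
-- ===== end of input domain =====

-- B precomputes the set of trigger indices in one pass over random_numbers, then emits in a
-- second pass (A pops random_numbers in place while looping; B does not mutate its arguments —
-- the equivalence proved here is about the RETURN value only).

-- shared helper: Python's output_lines.extend(<string>) splays the string into 1-char strings
def pvSplay (s : String) : List String := s.toList.map (fun c => String.ofList [c])

-- ===== PORT A =====
-- the for-loop of A; state = (output_lines, inserted_count, prev_line, first_num, random_numbers).
-- A's enumerate index line_index is never used, so it is not carried.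
def pvGoA (lines : List String) (out : List String) (cnt : Int) (prev : String)
    (first : Int) (nums : List Int) : List String :=
  match lines with
  | [] => out
  | line :: rest =>
    let s := PySem.Str.strip line
    if cnt = first then
      let out :=
        if s = "IT" then
          out ++ [line] ++ pvSplay "SOP-TRG\n" ++ pvSplay "HDP-TRG\n" ++ pvSplay "EOP-TRG\n"
        else if s = "SOP" then
          out ++ [line] ++ pvSplay "HDP\n" ++ pvSplay "EOP-TRG\n" ++ pvSplay "SOP-TRG\n" ++ pvSplay "HDP-TRG\n" ++ pvSplay "HDP\n"
        else if s = "HDP" then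
          out ++ [line] ++ pvSplay "EOP-TRG\n" ++ pvSplay "SOP-TRG\n" ++ pvSplay "HDP-TRG\n" ++ pvSplay "HDP\n"
        else if s = "EOP" then
          out ++ [line] ++ pvSplay "SOP-TRG\n" ++ pvSplay "HDP-TRG\n" ++ pvSplay "EOP-TRG\n"
        else if s = "SOP-INT" then
          out ++ [line] ++ pvSplay "HDP\n" ++ pvSplay "EOP-TRG\n" ++ pvSplay "SOP-TRG\n" ++ pvSplay "HDP-TRG\n" ++ pvSplay "HDP\n"
        else if s = "EOP-INT" then
          out ++ [line] ++ pvSplay "SOP-TRG\n" ++ pvSplay "HDP-TRG\n" ++ pvSplay "EOP-TRG\n"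
        else if s = "SOP-IOACK" then
          if prev = "EOP-IOACK" then
            out ++ pvSplay "SOP-TRG\n" ++ pvSplay "HDP-TRG\n" ++ pvSplay "EOP-TRG\n" ++ [line]
          else
            out ++ pvSplay "SOP-TRG\n" ++ pvSplay "HDP-TRG\n" ++ pvSplay "EOP-TRG\n" ++ [line]
        else if s = "HDP-IOACK" then
          out ++ [line]
        else if s = "EOP-IOACK" then
          if prev = "HDF-IOACK" then
            out ++ [line] ++ pvSplay "SOP-TRG\n" ++ pvSplay "HDP-TRG\n" ++ pvSplay "EOP-TRG\n"
          else
            out ++ [line] ++ pvSplay "IT\n" ++ pvSplay "IT\n" ++ pvSplay "IT\n" ++ pvSplay "SOP-TRG\n" ++ pvSplay "HDP-TRG\n" ++ pvSplay "EOP-TRG\n"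
        else out
      match nums with
      | n :: r => pvGoA rest out (cnt + 1) s n r
      | [] => pvGoA rest out (cnt + 1) s 100000000 []
    else
      pvGoA rest (out ++ [line]) (cnt + 1) s first nums

def process_input_lines (input_lines : List String) (random_numbers : List Int) : List String :=
  match random_numbers with
  | [] => []   -- with random_numbers = [] Python's A raises NameError on the first iteration;
               -- Pre_ excludes that, and the only remaining case (input_lines = []) returns []
  | n :: rest => pvGoA input_lines [] 0 "" n rest

-- ===== PORT B =====
def pvSentinel : Int := 100000000

-- Source B's _block: the output produced for a line standing at a trigger index
def pvBlock (line prev : String) : List String :=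
  let key := PySem.Str.strip line
  let TRG := "SOP-TRG\nHDP-TRG\nEOP-TRG\n"
  let FULL := "HDP\nEOP-TRG\nSOP-TRG\nHDP-TRG\nHDP\n"
  if key = "SOP-IOACK" then pvSplay TRG ++ [line]
  else if key = "IT" ∨ key = "EOP" ∨ key = "EOP-INT" then [line] ++ pvSplay TRG
  else if key = "SOP" ∨ key = "SOP-INT" then [line] ++ pvSplay FULL
  else if key = "HDP" then [line] ++ pvSplay "EOP-TRG\nSOP-TRG\nHDP-TRG\nHDP\n"
  else if key = "HDP-IOACK" then [line] ++ pvSplay ""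
  else if key = "EOP-IOACK" then
    [line] ++ pvSplay (if prev = "HDF-IOACK" then TRG else "IT\nIT\nIT\n" ++ TRG)
  else []

-- Source B stage 1: the for-r loop with break, building the set of firing indices
def pvTrigAux (rs : List Int) (last n : Int) (acc : PySem.Set Int) : PySem.Set Int :=
  match rs with
  | [] => acc
  | r :: rest => if last < r ∧ r < n then pvTrigAux rest r n (acc.add r) else acc

-- Source B stage 2: the for-i,line loop
def pvStage2 (lines : List String) (out : List String) (i : Nat) (prev : String)
    (trig : PySem.Set Int) : List String :=
  match lines with
  | [] => out
  | line :: rest =>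
    let out := if PySem.Set.contains trig (i : Int) then out ++ pvBlock line prev else out ++ [line]
    pvStage2 rest out (i + 1) (PySem.Str.strip line) trig

def process_input_lines_alt (input_lines : List String) (random_numbers : List Int) : List String :=
  let n : Int := input_lines.length
  let trig := pvTrigAux (random_numbers ++ [pvSentinel]) (-1) n PySem.Set.empty
  pvStage2 input_lines [] 0 "" trig

-- ===== PRECONDITION & SPEC =====
-- Pre_ excludes exactly the inputs on which A raises NameError (first_num unbound):
-- a nonempty input_lines together with an empty random_numbers.
def Pre_process_input_lines (input_lines : List String) (random_numbers : List Int) : Prop :=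
  input_lines = [] ∨ random_numbers ≠ []
instance (input_lines : List String) (random_numbers : List Int) : Decidable (Pre_process_input_lines input_lines random_numbers) := by unfold Pre_process_input_lines; infer_instance
def pvWitness_process_input_lines : List String × List Int := (["IT\n", "x"], [0])

def Spec_process_input_lines (input_lines : List String) (random_numbers : List Int) (out : List String) : Prop := out = process_input_lines_alt input_lines random_numbers
instance (input_lines : List String) (random_numbers : List Int) (out : List String) : Decidable (Spec_process_input_lines input_lines random_numbers out) := by unfold Spec_process_input_lines; infer_instance

-- ===== CLAIM (what is proved, stated in full; the proofs are below) =====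
def Claim_equal_process_input_lines : Prop := ∀ (input_lines : List String) (random_numbers : List Int), Dom_process_input_lines input_lines random_numbers → Pre_process_input_lines input_lines random_numbers → Spec_process_input_lines input_lines random_numbers (process_input_lines input_lines random_numbers)

-- ===== LEMMAS AND PROOFS =====

-- A's cascade on one line equals appending B's block
lemma pv_block_eq (out : List String) (line prev : String) :
    (if PySem.Str.strip line = "IT" then
        out ++ [line] ++ pvSplay "SOP-TRG\n" ++ pvSplay "HDP-TRG\n" ++ pvSplay "EOP-TRG\n"
      else if PySem.Str.strip line = "SOP" then
        out ++ [line] ++ pvSplay "HDP\n" ++ pvSplay "EOP-TRG\n" ++ pvSplay "SOP-TRG\n" ++ pvSplay "HDP-TRG\n" ++ pvSplay "HDP\n"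
      else if PySem.Str.strip line = "HDP" then
        out ++ [line] ++ pvSplay "EOP-TRG\n" ++ pvSplay "SOP-TRG\n" ++ pvSplay "HDP-TRG\n" ++ pvSplay "HDP\n"
      else if PySem.Str.strip line = "EOP" then
        out ++ [line] ++ pvSplay "SOP-TRG\n" ++ pvSplay "HDP-TRG\n" ++ pvSplay "EOP-TRG\n"
      else if PySem.Str.strip line = "SOP-INT" then
        out ++ [line] ++ pvSplay "HDP\n" ++ pvSplay "EOP-TRG\n" ++ pvSplay "SOP-TRG\n" ++ pvSplay "HDP-TRG\n" ++ pvSplay "HDP\n"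
      else if PySem.Str.strip line = "EOP-INT" then
        out ++ [line] ++ pvSplay "SOP-TRG\n" ++ pvSplay "HDP-TRG\n" ++ pvSplay "EOP-TRG\n"
      else if PySem.Str.strip line = "SOP-IOACK" then
        if prev = "EOP-IOACK" then
          out ++ pvSplay "SOP-TRG\n" ++ pvSplay "HDP-TRG\n" ++ pvSplay "EOP-TRG\n" ++ [line]
        else
          out ++ pvSplay "SOP-TRG\n" ++ pvSplay "HDP-TRG\n" ++ pvSplay "EOP-TRG\n" ++ [line]
      else if PySem.Str.strip line = "HDP-IOACK" then
        out ++ [line]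
      else if PySem.Str.strip line = "EOP-IOACK" then
        if prev = "HDF-IOACK" then
          out ++ [line] ++ pvSplay "SOP-TRG\n" ++ pvSplay "HDP-TRG\n" ++ pvSplay "EOP-TRG\n"
        else
          out ++ [line] ++ pvSplay "IT\n" ++ pvSplay "IT\n" ++ pvSplay "IT\n" ++ pvSplay "SOP-TRG\n" ++ pvSplay "HDP-TRG\n" ++ pvSplay "EOP-TRG\n"
      else out)
    = out ++ pvBlock line prev := by
  have e1 : pvSplay "SOP-TRG\nHDP-TRG\nEOP-TRG\n" =
      pvSplay "SOP-TRG\n" ++ pvSplay "HDP-TRG\n" ++ pvSplay "EOP-TRG\n" := by decide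
  have e2 : pvSplay "HDP\nEOP-TRG\nSOP-TRG\nHDP-TRG\nHDP\n" =
      pvSplay "HDP\n" ++ pvSplay "EOP-TRG\n" ++ pvSplay "SOP-TRG\n" ++ pvSplay "HDP-TRG\n" ++ pvSplay "HDP\n" := by decide
  have e3 : pvSplay "EOP-TRG\nSOP-TRG\nHDP-TRG\nHDP\n" =
      pvSplay "EOP-TRG\n" ++ pvSplay "SOP-TRG\n" ++ pvSplay "HDP-TRG\n" ++ pvSplay "HDP\n" := by decide
  have e4 : pvSplay "IT\nIT\nIT\nSOP-TRG\nHDP-TRG\nEOP-TRG\n" =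
      pvSplay "IT\n" ++ pvSplay "IT\n" ++ pvSplay "IT\n" ++ pvSplay "SOP-TRG\n" ++ pvSplay "HDP-TRG\n" ++ pvSplay "EOP-TRG\n" := by decide
  have e5 : ("IT\nIT\nIT\n" ++ "SOP-TRG\nHDP-TRG\nEOP-TRG\n" : String) =
      "IT\nIT\nIT\nSOP-TRG\nHDP-TRG\nEOP-TRG\n" := by decide
  have e0 : pvSplay "" = ([] : List String) := by decide
  unfold pvBlock
  generalize PySem.Str.strip line = s
  by_cases h1 : s = "IT"
  · simp [h1, e1, List.append_assoc]
  by_cases h2 : s = "SOP"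
  · simp [h2, e2, List.append_assoc]
  by_cases h3 : s = "HDP"
  · simp [h3, e3, List.append_assoc]
  by_cases h4 : s = "EOP"
  · simp [h4, e1, List.append_assoc]
  by_cases h5 : s = "SOP-INT"
  · simp [h5, e2, List.append_assoc]
  by_cases h6 : s = "EOP-INT"
  · simp [h6, e1, List.append_assoc]
  by_cases h7 : s = "SOP-IOACK"
  · by_cases hp : prev = "EOP-IOACK" <;>
      simp [h7, hp, e1, List.append_assoc]
  by_cases h8 : s = "HDP-IOACK"
  · simp [h8, e0]
  by_cases h9 : s = "EOP-IOACK"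
  · by_cases hp : prev = "HDF-IOACK" <;>
      simp [h9, hp, e1, e4, e5, List.append_assoc]
  · simp [h1, h2, h3, h4, h5, h6, h7, h8, h9]

-- pure-list version of stage 1 (proof helper)
def trigL (rs : List Int) (last n : Int) : List Int :=
  match rs with
  | [] => []
  | r :: rest => if last < r ∧ r < n then r :: trigL rest r n else []

lemma mem_trigAux : ∀ (rs : List Int) (last n : Int) (acc : PySem.Set Int) (x : Int),
    x ∈ pvTrigAux rs last n acc ↔ x ∈ acc ∨ x ∈ trigL rs last n := by
  intro rs
  induction rs with
  | nil => intro last n acc x; simp [pvTrigAux, trigL]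
  | cons r rest ih =>
    intro last n acc x
    by_cases h : last < r ∧ r < n
    · simp only [pvTrigAux, trigL, if_pos h]
      rw [ih]
      simp [PySem.Set.mem_add]
      tauto
    · simp [pvTrigAux, trigL, if_neg h]

lemma trigL_gt : ∀ (rs : List Int) (last n x : Int), x ∈ trigL rs last n → last < x := by
  intro rs
  induction rs with
  | nil => intro last n x h; simp [trigL] at h
  | cons r rest ih =>
    intro last n x h
    by_cases hc : last < r ∧ r < n
    · simp only [trigL, if_pos hc, List.mem_cons] at h
      rcases h with h | h
      · omega
      · have := ih r n x h; omega
    · simp [trigL, if_neg hc] at h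

lemma trigL_shift (r : Int) (rest : List Int) (i n : Int) (hr : r ≠ i) :
    trigL (r :: rest) (i - 1) n = trigL (r :: rest) i n := by
  have : (i - 1 < r ∧ r < n) ↔ (i < r ∧ r < n) := by omega
  simp only [trigL, this]

lemma pv_contains_true {s : PySem.Set Int} {x : Int} :
    PySem.Set.contains s x = true ↔ x ∈ s := by
  simp [PySem.Set.contains]

-- A's loop, rephrased over the pending-numbers list q (head = current first_num, default sentinel)
def pvGoQ (lines : List String) (out : List String) (i : Nat) (prev : String)
    (q : List Int) : List String :=
  match lines with
  | [] => out
  | line :: rest =>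
    if (i : Int) = q.headD pvSentinel then
      pvGoQ rest (out ++ pvBlock line prev) (i + 1) (PySem.Str.strip line) q.tail
    else
      pvGoQ rest (out ++ [line]) (i + 1) (PySem.Str.strip line) q

lemma pvGoQ_sentinel : ∀ (lines out : List String) (i : Nat) (prev : String),
    pvGoQ lines out i prev [pvSentinel] = pvGoQ lines out i prev [] := by
  intro lines
  induction lines with
  | nil => intro out i prev; simp [pvGoQ]
  | cons line rest ih =>
    intro out i prev
    simp only [pvGoQ, List.headD, List.tail]
    by_cases h : (i : Int) = pvSentinel <;> simp [h, ih]

lemma pvGoA_eq_goQ : ∀ (lines out : List String) (i : Nat) (prev : String)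
    (first : Int) (nums : List Int),
    pvGoA lines out (i : Int) prev first nums = pvGoQ lines out i prev (first :: nums) := by
  intro lines
  induction lines with
  | nil => intro out i prev first nums; simp [pvGoA, pvGoQ]
  | cons line rest ih =>
    intro out i prev first nums
    rw [pvGoA, pvGoQ]
    simp only [List.headD, List.tail]
    have hc1 : ((i : Int) + 1) = ((i + 1 : Nat) : Int) := by push_cast; ring
    by_cases h : (i : Int) = first
    · simp only [if_pos h, pv_block_eq]
      cases nums with
      | nil =>
        show pvGoA rest (out ++ pvBlock line prev) ((i : Int) + 1) (PySem.Str.strip line) 100000000 [] = _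
        rw [hc1, ih, show (100000000 : Int) = pvSentinel from rfl, pvGoQ_sentinel]
      | cons m r =>
        show pvGoA rest (out ++ pvBlock line prev) ((i : Int) + 1) (PySem.Str.strip line) m r = _
        rw [hc1, ih]
    · simp only [if_neg h]
      rw [hc1]
      exact ih (out ++ [line]) (i + 1) (PySem.Str.strip line) first nums

lemma pvGoQ_eq_stage2 (n : Int) (T : PySem.Set Int) :
    ∀ (lines out : List String) (i : Nat) (prev : String) (q : List Int),
    n = (i : Int) + lines.length →
    (∀ x : Int, (i : Int) ≤ x → (x ∈ T ↔ x ∈ trigL (q ++ [pvSentinel]) ((i : Int) - 1) n)) →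
    pvGoQ lines out i prev q = pvStage2 lines out i prev T := by
  intro lines
  induction lines with
  | nil => intro out i prev q _ _; simp [pvGoQ, pvStage2]
  | cons line rest ih =>
    intro out i prev q hn H
    have hin : (i : Int) < n := by
      simp only [List.length_cons] at hn; push_cast at hn; omega
    rw [pvGoQ, pvStage2]
    cases q with
    | cons r qt =>
      simp only [List.headD, List.tail]
      by_cases hr : (i : Int) = r
      · -- fire
        subst hr
        have hcond : ((i : Int) - 1 < (i : Int) ∧ (i : Int) < n) := ⟨by omega, hin⟩
        have hmem : (i : Int) ∈ T := by
          rw [H i le_rfl, List.cons_append]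
          simp only [trigL, if_pos hcond, List.mem_cons]
          exact Or.inl trivial
        have hct : PySem.Set.contains T (i : Int) = true := pv_contains_true.mpr hmem
        rw [if_pos rfl, hct, if_pos rfl]
        apply ih _ (i + 1) _ qt
        · simp only [List.length_cons] at hn; push_cast at hn ⊢; omega
        · intro x hx
          have hx' : (i : Int) ≤ x := by push_cast at hx ⊢; omega
          have hxi : ¬ x = (i : Int) := by push_cast at hx; omega
          rw [H x hx', List.cons_append,
            show ((i + 1 : Nat) : Int) - 1 = (i : Int) by push_cast; ring]
          simp only [trigL, if_pos hcond, List.mem_cons]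
          constructor
          · rintro (h | h)
            · exact absurd h hxi
            · exact h
          · exact Or.inr
      · -- no fire
        have hnotmem : (i : Int) ∉ T := by
          rw [H i le_rfl, List.cons_append]
          intro hmem
          by_cases hcond : ((i : Int) - 1 < r ∧ r < n)
          · rw [show trigL (r :: (qt ++ [pvSentinel])) ((i : Int) - 1) n
                  = r :: trigL (qt ++ [pvSentinel]) r n from by
                simp only [trigL, if_pos hcond]] at hmem
            rcases List.mem_cons.mp hmem with h | h
            · exact hr h
            · have := trigL_gt _ _ _ _ h; omega
          · rw [show trigL (r :: (qt ++ [pvSentinel])) ((i : Int) - 1) n = [] from by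
                simp only [trigL, if_neg hcond]] at hmem
            exact List.not_mem_nil hmem
        have hcf : PySem.Set.contains T (i : Int) = false :=
          Bool.eq_false_iff.mpr (fun h => hnotmem (pv_contains_true.mp h))
        rw [if_neg hr, hcf, if_neg Bool.false_ne_true]
        apply ih _ (i + 1) _ (r :: qt)
        · simp only [List.length_cons] at hn; push_cast at hn ⊢; omega
        · intro x hx
          have hx' : (i : Int) ≤ x := by push_cast at hx ⊢; omega
          rw [show ((i + 1 : Nat) : Int) - 1 = (i : Int) by push_cast; ring, List.cons_append,
            ← trigL_shift r (qt ++ [pvSentinel]) (i : Int) n (Ne.symm hr), ← List.cons_append]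
          exact H x hx'
    | nil =>
      simp only [List.headD, List.tail]
      have hs : pvSentinel = 100000000 := rfl
      by_cases hi : (i : Int) = pvSentinel
      · -- the sentinel itself fires (only on absurdly long inputs, but provable)
        have hcond : ((i : Int) - 1 < pvSentinel ∧ pvSentinel < n) := ⟨by omega, by omega⟩
        have hmem : (i : Int) ∈ T := by
          rw [H i le_rfl, List.nil_append]
          simp only [trigL, if_pos hcond, List.mem_cons]
          exact Or.inl hi
        have hct : PySem.Set.contains T (i : Int) = true := pv_contains_true.mpr hmem
        rw [if_pos hi, hct, if_pos rfl]
        apply ih _ (i + 1) _ []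
        · simp only [List.length_cons] at hn; push_cast at hn ⊢; omega
        · intro x hx
          have hx' : (i : Int) ≤ x := by push_cast at hx ⊢; omega
          have hcond2 : ¬((i : Int) < pvSentinel ∧ pvSentinel < n) := by omega
          rw [H x hx', show ((i + 1 : Nat) : Int) - 1 = (i : Int) by push_cast; ring]
          simp only [List.nil_append]
          simp only [trigL, if_pos hcond, if_neg hcond2, List.mem_cons, List.not_mem_nil,
            or_false, iff_false]
          intro h2
          rw [h2, ← hi] at hx
          push_cast at hx; omega
      · -- sentinel does not fire here
        have hnotmem : (i : Int) ∉ T := by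
          rw [H i le_rfl, List.nil_append]
          intro hmem
          by_cases hcond : ((i : Int) - 1 < pvSentinel ∧ pvSentinel < n)
          · rw [show trigL [pvSentinel] ((i : Int) - 1) n
                  = pvSentinel :: trigL [] pvSentinel n from by
                simp only [trigL, if_pos hcond]] at hmem
            rcases List.mem_cons.mp hmem with h | h
            · exact hi h
            · exact List.not_mem_nil h
          · rw [show trigL [pvSentinel] ((i : Int) - 1) n = [] from by
                simp only [trigL, if_neg hcond]] at hmem
            exact List.not_mem_nil hmem
        have hcf : PySem.Set.contains T (i : Int) = false :=
          Bool.eq_false_iff.mpr (fun h => hnotmem (pv_contains_true.mp h))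
        rw [if_neg hi, hcf, if_neg Bool.false_ne_true]
        apply ih _ (i + 1) _ []
        · simp only [List.length_cons] at hn; push_cast at hn ⊢; omega
        · intro x hx
          have hx' : (i : Int) ≤ x := by push_cast at hx ⊢; omega
          rw [show ((i + 1 : Nat) : Int) - 1 = (i : Int) by push_cast; ring]
          simp only [List.nil_append]
          rw [← trigL_shift pvSentinel [] (i : Int) n (fun he => hi he.symm)]
          exact H x hx'

-- ===== VERDICT (by name: the statement is the Claim_ definition above) =====
theorem process_input_lines_spec : Claim_equal_process_input_lines := by
  intro input_lines random_numbers _ hpre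
  unfold Spec_process_input_lines process_input_lines process_input_lines_alt
  cases random_numbers with
  | nil =>
    rcases hpre with h | h
    · subst h; simp [pvStage2]
    · exact absurd rfl h
  | cons n0 rest =>
    show pvGoA input_lines [] ((0 : Nat) : Int) "" n0 rest =
      pvStage2 input_lines [] 0 ""
        (pvTrigAux ((n0 :: rest) ++ [pvSentinel]) (-1) (input_lines.length : Int) PySem.Set.empty)
    rw [pvGoA_eq_goQ]
    apply pvGoQ_eq_stage2 (input_lines.length : Int)
    · simp
    · intro x _
      rw [mem_trigAux]
      simp only [PySem.Set.empty, List.not_mem_nil, false_or]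
      norm_num
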